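-- pv_equiv track=rewrite | github.com/Hmbown/Bachbot | bachbot/composition/generators/invention.py | _nearest_scale_midi
-- ===== SOURCE A (Python) =====
-- _MAJOR_SCALE = (0, 2, 4, 5, 7, 9, 11)
--
-- _MINOR_SCALE = (0, 2, 3, 5, 7, 8, 10)
--
-- def _scale_pcs(tonic_pc: int, mode: str) -> list[int]:
--     """Return the 7 pitch-classes of the diatonic scale."""
--     base = _MAJOR_SCALE if mode == "major" else _MINOR_SCALE
--     return [(tonic_pc + s) % 12 for s in base]
--
-- def _nearest_scale_midi(midi: int, tonic_pc: int, mode: str) -> int: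
--     """Snap a MIDI pitch to the nearest diatonic scale tone."""
--     pcs = set(_scale_pcs(tonic_pc, mode))
--     if midi % 12 in pcs:
--         return midi
--     for offset in (1, -1, 2, -2):
--         if (midi + offset) % 12 in pcs:
--             return midi + offset
--     return midi  # fallback
-- ===== SOURCE B (Python) =====
-- # B: closed form — relative pitch-class test; every non-scale pc in a diatonic
-- # scale sits one semitone below a scale tone, so the answer is midi or midi+1.
-- _MAJOR_DEGREES = frozenset((0, 2, 4, 5, 7, 9, 11))
-- _MINOR_DEGREES = frozenset((0, 2, 3, 5, 7, 8, 10))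
--
-- def _nearest_scale_midi(midi: int, tonic_pc: int, mode: str) -> int:
--     scale = _MAJOR_DEGREES if mode == "major" else _MINOR_DEGREES
--     return midi if (midi - tonic_pc) % 12 in scale else midi + 1
-- ===== Notes on version B (the rewrite author's own statement) =====
-- stated objective: simpler
-- what changed: Replaces the per-call construction of absolute scale pitch-classes and the 4-offset probe loop with a single relative pitch-class membership test against a fixed degree set, returning midi or midi+1 (in a diatonic scale every non-scale pitch-class is exactly one semitone below a scale tone, so A's loop always resolves at offset +1).
import Mathlib
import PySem

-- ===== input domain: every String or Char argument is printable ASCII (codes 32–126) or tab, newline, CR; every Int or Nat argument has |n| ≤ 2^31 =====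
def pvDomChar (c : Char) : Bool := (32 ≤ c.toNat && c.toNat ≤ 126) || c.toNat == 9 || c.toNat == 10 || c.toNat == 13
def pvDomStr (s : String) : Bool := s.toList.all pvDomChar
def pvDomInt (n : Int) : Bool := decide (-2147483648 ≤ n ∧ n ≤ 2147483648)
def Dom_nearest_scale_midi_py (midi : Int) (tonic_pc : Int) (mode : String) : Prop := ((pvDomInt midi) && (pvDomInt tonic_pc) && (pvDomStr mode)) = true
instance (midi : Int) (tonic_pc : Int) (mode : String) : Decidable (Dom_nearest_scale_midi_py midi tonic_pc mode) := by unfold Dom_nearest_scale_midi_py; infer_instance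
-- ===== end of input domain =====

-- B replaces A's per-call absolute pitch-class set and 4-offset probe loop with one
-- relative pitch-class membership test (return midi or midi+1); objective: simpler.

-- ===== PORT A =====
-- helper _scale_pcs
def scale_pcs_py (tonic_pc : Int) (mode : String) : List Int :=
  let base : List Int := if mode == "major" then [0, 2, 4, 5, 7, 9, 11] else [0, 2, 3, 5, 7, 8, 10]
  base.map (fun s => PySem.Int.mod (tonic_pc + s) 12)

-- the 'for offset in (1, -1, 2, -2)' loop with early return, unrolled branch by branch
def nearest_scale_midi_py (midi : Int) (tonic_pc : Int) (mode : String) : Int :=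
  let pcs : PySem.Set Int := PySem.Set.ofList (scale_pcs_py tonic_pc mode)
  if PySem.Set.contains pcs (PySem.Int.mod midi 12) then midi
  else if PySem.Set.contains pcs (PySem.Int.mod (midi + 1) 12) then midi + 1
  else if PySem.Set.contains pcs (PySem.Int.mod (midi + -1) 12) then midi + -1
  else if PySem.Set.contains pcs (PySem.Int.mod (midi + 2) 12) then midi + 2
  else if PySem.Set.contains pcs (PySem.Int.mod (midi + -2) 12) then midi + -2
  else midi

-- ===== PORT B =====
-- the frozenset literals hold distinct ints, so 'in' is membership in the literal list
def nearest_scale_midi_py_alt (midi : Int) (tonic_pc : Int) (mode : String) : Int :=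
  let scale : List Int := if mode == "major" then [0, 2, 4, 5, 7, 9, 11] else [0, 2, 3, 5, 7, 8, 10]
  if scale.contains (PySem.Int.mod (midi - tonic_pc) 12) then midi else midi + 1

-- ===== PRECONDITION & SPEC =====
def Spec_nearest_scale_midi_py (midi : Int) (tonic_pc : Int) (mode : String) (out : Int) : Prop := out = nearest_scale_midi_py_alt midi tonic_pc mode
instance (midi : Int) (tonic_pc : Int) (mode : String) (out : Int) : Decidable (Spec_nearest_scale_midi_py midi tonic_pc mode out) := by unfold Spec_nearest_scale_midi_py; infer_instance

-- ===== CLAIM (what is proved, stated in full; the proofs are below) =====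
def Claim_equal_nearest_scale_midi_py : Prop := ∀ (midi : Int) (tonic_pc : Int) (mode : String), Dom_nearest_scale_midi_py midi tonic_pc mode → Spec_nearest_scale_midi_py midi tonic_pc mode (nearest_scale_midi_py midi tonic_pc mode)

-- ===== LEMMAS AND PROOFS =====

-- membership of x % 12 in the shifted scale = membership of the relative pitch class in the base degrees
theorem contains_scale (x tonic : Int) (base : List Int)
    (hb : ∀ s ∈ base, 0 ≤ s ∧ s < 12) :
    PySem.Set.contains (PySem.Set.ofList (base.map (fun s => PySem.Int.mod (tonic + s) 12)))
      (PySem.Int.mod x 12)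
      = base.contains ((x - tonic) % 12) := by
  rw [Bool.eq_iff_iff]
  simp only [PySem.Set.contains_iff, PySem.Set.mem_ofList, List.mem_map,
    List.contains_iff_mem,
    PySem.Int.mod_eq_emod_of_pos (show (0:Int) < 12 by norm_num)]
  constructor
  · rintro ⟨s, hs, he⟩
    obtain ⟨h0, h1⟩ := hb s hs
    have : (x - tonic) % 12 = s := by omega
    rwa [this]
  · intro hm
    obtain ⟨h0, h1⟩ := hb _ hm
    exact ⟨(x - tonic) % 12, hm, by omega⟩

-- ===== VERDICT (by name: the statement is the Claim_ definition above) =====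
theorem nearest_scale_midi_py_spec : Claim_equal_nearest_scale_midi_py := by
  intro midi tonic_pc mode _
  unfold Spec_nearest_scale_midi_py nearest_scale_midi_py nearest_scale_midi_py_alt scale_pcs_py
  cases h : (mode == "major") <;>
  · simp only [Bool.false_eq_true, reduceIte]
    rw [contains_scale midi, contains_scale (midi + 1), contains_scale (midi + -1),
        contains_scale (midi + 2), contains_scale (midi + -2)] <;>
      (try intro s hs) <;> (try (fin_cases hs <;> norm_num))
    rw [PySem.Int.mod_eq_emod_of_pos (show (0:Int) < 12 by norm_num)]
    have e1 : (midi + 1 - tonic_pc) % 12 = ((midi - tonic_pc) % 12 + 1) % 12 := by omega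
    have e2 : (midi + -1 - tonic_pc) % 12 = ((midi - tonic_pc) % 12 + 11) % 12 := by omega
    have e3 : (midi + 2 - tonic_pc) % 12 = ((midi - tonic_pc) % 12 + 2) % 12 := by omega
    have e4 : (midi + -2 - tonic_pc) % 12 = ((midi - tonic_pc) % 12 + 10) % 12 := by omega
    rw [e1, e2, e3, e4]
    have hr : 0 ≤ (midi - tonic_pc) % 12 ∧ (midi - tonic_pc) % 12 < 12 := by omega
    set r := (midi - tonic_pc) % 12 with hrdef
    clear_value r
    obtain ⟨hr0, hr1⟩ := hr
    interval_cases r <;> norm_num
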